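-- pv_equiv track=rewrite | github.com/hakaraman/Daily_Python | 20200923.py | num_ways3
-- ===== SOURCE A (Python) =====
-- def num_ways3(n, m):
--     i, j, k, r = 1, 1, 0, 0
--     while (i != n) or (j != m):
--         moved = False
--         while not moved:
--             if k:
--                 if j < m:
--                     j += 1
--                     moved = True
--             else:
--                 if i < n:
--                     i += 1
--                     moved = True
--             k = 1 -k
--         r += 1
--     return r
-- ===== SOURCE B (Python) =====
-- def num_ways3(n, m):
--     # closed form: each step increases i+j by exactly 1, from 2 to n+m
--     return n + m - 2
-- ===== Notes on version B (the rewrite author's own statement) =====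
-- stated objective: faster
-- what changed: Replaced the zigzag simulation loop by the closed form n+m-2 (each outer iteration advances i+j by exactly 1).
import Mathlib
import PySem

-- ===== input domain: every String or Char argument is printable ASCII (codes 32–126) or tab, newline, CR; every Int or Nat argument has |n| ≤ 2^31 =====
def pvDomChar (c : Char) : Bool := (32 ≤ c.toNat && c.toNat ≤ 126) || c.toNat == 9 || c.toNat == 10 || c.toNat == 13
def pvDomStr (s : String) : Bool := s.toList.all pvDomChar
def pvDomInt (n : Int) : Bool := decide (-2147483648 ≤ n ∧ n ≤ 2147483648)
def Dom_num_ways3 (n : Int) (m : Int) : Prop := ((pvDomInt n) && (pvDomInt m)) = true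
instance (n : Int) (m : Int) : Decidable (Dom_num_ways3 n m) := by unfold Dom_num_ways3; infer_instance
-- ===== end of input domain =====

-- B replaces A's step-by-step zigzag walk simulation by the closed form n+m-2 (faster).
-- Pre_ excludes n<1 or m<1, where A's while-loop never terminates.


-- ===== PORT A =====
-- inner 'while not moved' loop: each pass toggles k and moves at most one coordinate;
-- it needs at most 2 passes when a move is possible, so fuel 2 is exact there
-- (none = the Python inner loop diverges; excluded by Pre_).
def pvInner_num_ways3 (fuel : Nat) (n m i j k : Int) : Option (Int × Int × Int) :=
  match fuel with
  | 0 => none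
  | f + 1 =>
    if k ≠ 0 then
      if j < m then some (i, j + 1, 1 - k) else pvInner_num_ways3 f n m i j (1 - k)
    else
      if i < n then some (i + 1, j, 1 - k) else pvInner_num_ways3 f n m i j (1 - k)

-- outer 'while (i != n) or (j != m)' loop, fuel-bounded (fuel is exact under Pre_).
def pvOuter_num_ways3 (fuel : Nat) (n m i j k r : Int) : Int :=
  match fuel with
  | 0 => r
  | f + 1 =>
    if i ≠ n ∨ j ≠ m then
      match pvInner_num_ways3 2 n m i j k with
      | some (i', j', k') => pvOuter_num_ways3 f n m i' j' k' (r + 1)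
      | none => r
    else r

def num_ways3 (n : Int) (m : Int) : Int :=
  pvOuter_num_ways3 ((n - 1) + (m - 1)).toNat n m 1 1 0 0

-- ===== PORT B =====
def num_ways3_alt (n : Int) (m : Int) : Int := n + m - 2

-- ===== PRECONDITION & SPEC =====
-- A's while-loop never terminates when n < 1 or m < 1; Pre_ excludes exactly those inputs.
def Pre_num_ways3 (n : Int) (m : Int) : Prop := 1 ≤ n ∧ 1 ≤ m
instance (n : Int) (m : Int) : Decidable (Pre_num_ways3 n m) := by unfold Pre_num_ways3; infer_instance
def pvWitness_num_ways3 : Int × Int := (3, 4)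

def Spec_num_ways3 (n : Int) (m : Int) (out : Int) : Prop := out = num_ways3_alt n m
instance (n : Int) (m : Int) (out : Int) : Decidable (Spec_num_ways3 n m out) := by unfold Spec_num_ways3; infer_instance

-- ===== CLAIM =====
def Claim_equal_num_ways3 : Prop := ∀ (n : Int) (m : Int), Dom_num_ways3 n m → Pre_num_ways3 n m → Spec_num_ways3 n m (num_ways3 n m)

-- ===== LEMMAS AND PROOFS =====
theorem pvOuter_closed (fuel : Nat) : ∀ (n m i j k r : Int),
    1 ≤ i → i ≤ n → 1 ≤ j → j ≤ m → (k = 0 ∨ k = 1) →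
    (fuel : Int) = (n - i) + (m - j) →
    pvOuter_num_ways3 fuel n m i j k r = r + (n - i) + (m - j) := by
  induction fuel with
  | zero =>
    intro n m i j k r _ hin _ hjm _ hf
    simp only [pvOuter_num_ways3]
    omega
  | succ f ih =>
    intro n m i j k r hi hin hj hjm hk hf
    have hmove : i < n ∨ j < m := by push_cast at hf; omega
    have hcond : i ≠ n ∨ j ≠ m := by omega
    simp only [pvOuter_num_ways3, if_pos hcond]
    rcases hk with hk | hk
    · subst hk
      by_cases hiN : i < n
      · simp only [pvInner_num_ways3]; simp only [if_neg (by omega : ¬ ((0:Int) ≠ 0)), if_pos hiN]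
        rw [ih n m (i+1) j (1-0) (r+1) (by omega) (by omega) hj hjm (by omega) (by push_cast at hf ⊢; omega)]
        omega
      · have hjM : j < m := by omega
        simp only [pvInner_num_ways3]
        simp only [if_neg (by omega : ¬ ((0:Int) ≠ 0)), if_neg hiN,
          if_pos (by omega : (1:Int) - 0 ≠ 0), if_pos hjM]
        rw [ih n m i (j+1) (1-(1-0)) (r+1) hi hin (by omega) (by omega) (by omega) (by push_cast at hf ⊢; omega)]
        omega
    · subst hk
      by_cases hjM : j < m
      · simp only [pvInner_num_ways3]; simp only [if_pos (by omega : (1:Int) ≠ 0), if_pos hjM]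
        rw [ih n m i (j+1) (1-1) (r+1) hi hin (by omega) (by omega) (by omega) (by push_cast at hf ⊢; omega)]
        omega
      · have hiN : i < n := by omega
        simp only [pvInner_num_ways3]
        simp only [if_pos (by omega : (1:Int) ≠ 0), if_neg hjM,
          if_neg (by omega : ¬ ((1:Int) - 1 ≠ 0)), if_pos hiN]
        rw [ih n m (i+1) j (1-(1-1)) (r+1) (by omega) (by omega) hj hjm (by omega) (by push_cast at hf ⊢; omega)]
        omega

-- ===== VERDICT =====
theorem num_ways3_spec : Claim_equal_num_ways3 := by
  intro n m _ hpre
  rcases hpre with ⟨hn, hm⟩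
  unfold Spec_num_ways3 num_ways3 num_ways3_alt
  rw [pvOuter_closed _ n m 1 1 0 0 le_rfl hn le_rfl hm (Or.inl rfl)
      (by omega)]
  ring
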